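-- pv_equiv track=rewrite | github.com/vem54/gpu-jason | gpu_poker_cfr/solvers/semi_vector_leduc_v2.py | _is_facing_bet
-- ===== SOURCE A (Python) =====
-- def _is_facing_bet(actions):
--     if not actions:
--         return False
--     for i in range(len(actions) - 1, -1, -1):
--         if actions[i] == 'b':
--             return True
--         if actions[i] == 'c' and i > 0 and actions[i-1] == 'b':
--             return False
--     return False
-- ===== SOURCE B (Python) =====
-- def _is_facing_bet(actions):
--     facing = False
--     prev = None
--     for a in actions:
--         if a == 'b':
--             facing = True
--         elif a == 'c' and prev == 'b':
--             facing = False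
--         prev = a
--     return facing
-- ===== Notes on version B (the rewrite author's own statement) =====
-- stated objective: alternative
-- what changed: Replaces A's backward early-exit index scan with a forward single pass over the actions that folds a running (facing, previous-action) state and returns the final facing flag.
import Mathlib
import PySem

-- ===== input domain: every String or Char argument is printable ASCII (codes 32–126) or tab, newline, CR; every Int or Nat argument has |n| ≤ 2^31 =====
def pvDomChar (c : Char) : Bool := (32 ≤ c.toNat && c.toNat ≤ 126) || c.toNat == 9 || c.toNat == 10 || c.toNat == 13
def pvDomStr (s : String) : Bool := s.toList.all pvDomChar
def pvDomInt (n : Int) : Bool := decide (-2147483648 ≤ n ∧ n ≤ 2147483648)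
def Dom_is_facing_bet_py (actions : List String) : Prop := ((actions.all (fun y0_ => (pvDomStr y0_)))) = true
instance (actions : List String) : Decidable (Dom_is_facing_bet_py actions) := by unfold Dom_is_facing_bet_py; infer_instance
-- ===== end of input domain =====

-- B replaces A's backward early-exit index scan with a forward fold of a (facing, previous-action) state; same cost, different decomposition.


-- ===== PORT A =====
-- backward scan over the index list range(len(actions)-1, -1, -1) with early exit
def pvALoop (actions : List String) : List Int → Bool
  | [] => false
  | i :: rest =>
    if PySem.List.pyGet? actions i = some "b" then true
    else if PySem.List.pyGet? actions i = some "c" ∧ i > 0 ∧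
            PySem.List.pyGet? actions (i - 1) = some "b" then false
    else pvALoop actions rest

def is_facing_bet_py (actions : List String) : Bool :=
  if actions = [] then false
  else pvALoop actions (PySem.List.pyRange ((actions.length : Int) - 1) (-1) (-1))

-- ===== PORT B =====
-- one forward step of B's state machine: state = (facing, previous action)
def pvBStep (st : Bool × Option String) (a : String) : Bool × Option String :=
  ( if a = "b" then true
    else if a = "c" ∧ st.2 = some "b" then false
    else st.1
  , some a)

def is_facing_bet_py_alt (actions : List String) : Bool :=
  (actions.foldl pvBStep (false, none)).1

-- ===== PRECONDITION & SPEC =====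
def Spec_is_facing_bet_py (actions : List String) (out : Bool) : Prop := out = is_facing_bet_py_alt actions
instance (actions : List String) (out : Bool) : Decidable (Spec_is_facing_bet_py actions out) := by unfold Spec_is_facing_bet_py; infer_instance

-- ===== CLAIM (what is proved, stated in full; the proofs are below) =====
def Claim_equal_is_facing_bet_py : Prop := ∀ (actions : List String), Dom_is_facing_bet_py actions → Spec_is_facing_bet_py actions (is_facing_bet_py actions)

-- ===== LEMMAS AND PROOFS =====

-- A equals its loop even on [], where the empty-list guard and the empty range coincide
theorem pvA_eq_loop (xs : List String) :
    is_facing_bet_py xs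
      = pvALoop xs (PySem.List.pyRange ((xs.length : Int) - 1) (-1) (-1)) := by
  cases xs with
  | nil =>
    rw [is_facing_bet_py, if_pos rfl, PySem.List.pyRange_neg_one_eq_nil (by simp)]
    rfl
  | cons x xs' => rw [is_facing_bet_py, if_neg (by simp)]

-- A's loop only looks at in-range indices, so appending an element past them changes nothing
theorem pvALoop_append (xs : List String) (a : String) (L : List Int)
    (h : ∀ i ∈ L, 0 ≤ i ∧ i < (xs.length : Int)) :
    pvALoop (xs ++ [a]) L = pvALoop xs L := by
  induction L with
  | nil => rfl
  | cons i rest ih =>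
    obtain ⟨h0, hlt⟩ := h i (List.mem_cons_self ..)
    have ihr := ih (fun j hj => h j (List.mem_cons_of_mem _ hj))
    have hg : PySem.List.pyGet? (xs ++ [a]) i = PySem.List.pyGet? xs i := by
      rw [PySem.List.pyGet?_of_nonneg _ h0, PySem.List.pyGet?_of_nonneg _ h0,
        List.getElem?_append_left (by omega)]
    simp only [pvALoop, hg]
    by_cases hi : (0 : Int) < i
    · have hg' : PySem.List.pyGet? (xs ++ [a]) (i - 1) = PySem.List.pyGet? xs (i - 1) := by
        rw [PySem.List.pyGet?_of_nonneg _ (by omega), PySem.List.pyGet?_of_nonneg _ (by omega),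
          List.getElem?_append_left (by omega)]
      rw [hg']
      split_ifs <;> first | rfl | exact ihr
    · have hi0 : i = 0 := by omega
      subst hi0
      simp only [gt_iff_lt, lt_irrefl, false_and, and_false, if_false]
      split_ifs <;> first | rfl | exact ihr

-- the second component of B's fold is the last action (or the initial previous action)
theorem pvB_snd (xs : List String) (st : Bool × Option String) :
    (List.foldl pvBStep st xs).2 = if xs = [] then st.2 else xs.getLast? := by
  induction xs generalizing st with
  | nil => rfl
  | cons x xs ih =>
    simp only [List.foldl_cons, ih, pvBStep]
    cases xs with
    | nil => simp
    | cons y ys => simp [List.getLast?_cons_cons]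

-- reading actions[len(xs)-1] inside xs ++ [a] yields the last element of xs
theorem pvGet_last (xs : List String) (a : String) (hx : xs ≠ []) :
    PySem.List.pyGet? (xs ++ [a]) ((xs.length : Int) - 1) = xs.getLast? := by
  have hlen : 0 < xs.length := List.length_pos_iff.mpr hx
  rw [PySem.List.pyGet?_of_nonneg _ (by omega),
    List.getElem?_append_left (by omega), List.getLast?_eq_getElem?]
  congr 1
  omega

-- main equivalence, by reverse induction on the action list
theorem pv_main (actions : List String) :
    is_facing_bet_py actions = is_facing_bet_py_alt actions := by
  induction actions using List.reverseRecOn with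
  | nil => rfl
  | append_singleton xs a ih =>
    have hne : xs ++ [a] ≠ [] := by simp
    have hlen : ((xs ++ [a]).length : Int) - 1 = (xs.length : Int) := by simp
    have hcons : PySem.List.pyRange ((xs.length : Int)) (-1) (-1)
        = (xs.length : Int) :: PySem.List.pyRange ((xs.length : Int) - 1) (-1) (-1) :=
      PySem.List.pyRange_neg_one_cons (by omega)
    have hga : PySem.List.pyGet? (xs ++ [a]) (xs.length : Int) = some a := by
      rw [PySem.List.pyGet?_of_nonneg _ (by omega)]
      simp
    have hsub : ∀ i ∈ PySem.List.pyRange ((xs.length : Int) - 1) (-1) (-1),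
        0 ≤ i ∧ i < (xs.length : Int) := by
      intro i hi
      rw [PySem.List.mem_pyRange_neg_one] at hi
      omega
    have hA : is_facing_bet_py (xs ++ [a])
        = ( if (some a : Option String) = some "b" then true
            else if (some a : Option String) = some "c" ∧ ((xs.length : Int)) > 0 ∧
                    PySem.List.pyGet? (xs ++ [a]) ((xs.length : Int) - 1) = some "b" then false
            else pvALoop (xs ++ [a])
                   (PySem.List.pyRange ((xs.length : Int) - 1) (-1) (-1))) := by
      rw [is_facing_bet_py, if_neg hne, hlen, hcons]
      simp only [pvALoop, hga]
    have hB : is_facing_bet_py_alt (xs ++ [a])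
        = ( if a = "b" then true
            else if a = "c" ∧ (List.foldl pvBStep (false, none) xs).2 = some "b" then false
            else is_facing_bet_py_alt xs) := by
      simp [is_facing_bet_py_alt, pvBStep]
    rw [hA, hB, pvALoop_append _ _ _ hsub, ← pvA_eq_loop, ih, pvB_snd]
    cases xs with
    | nil =>
      by_cases hb : a = "b" <;> simp [hb]
    | cons x xs' =>
      rw [pvGet_last _ _ (by simp)]
      by_cases hb : a = "b"
      · simp [hb]
      · by_cases hc : a = "c" <;>
          by_cases hlb : (x :: xs').getLast? = some "b" <;>
            simp [hb, hc, hlb]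

-- ===== VERDICT (by name: the statement is the Claim_ definition above) =====
theorem is_facing_bet_py_spec : Claim_equal_is_facing_bet_py := by
  intro actions _
  exact pv_main actions
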